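-- pv_equiv track=rewrite | github.com/adiroh12/algosolutions | q2.py | is_semi_connected
-- ===== SOURCE A (Python) =====
-- from collections import defaultdict, deque
--
-- def kosaraju_scc(graph):
--     visited = set()
--     order = []
--
--     def dfs1(u):
--         visited.add(u)
--         for v in graph[u]:
--             if v not in visited:
--                 dfs1(v)
--         order.append(u)
--
--     def dfs2(u, label):
--         component[u] = label
--         for v in transpose[u]:
--             if v not in component:
--                 dfs2(v, label)
--
--
--     for node in graph:
--         if node not in visited:
--             dfs1(node)
--
--
--     transpose = defaultdict(list)
--     for u in graph:
--         for v in graph[u]: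
--             transpose[v].append(u)
--
--
--     component = {}
--     label = 0
--     for u in reversed(order):
--         if u not in component:
--             dfs2(u, label)
--             label += 1
--
--     return component, label
--
-- def is_semi_connected(graph):
--     scc_map, num_sccs = kosaraju_scc(graph)
--
--     if num_sccs == 1:
--         return True
--
--
--     scc_graph = defaultdict(set)
--     for u in graph:
--         for v in graph[u]:
--             cu, cv = scc_map[u], scc_map[v]
--             if cu != cv:
--                 scc_graph[cu].add(cv)
--
--
--     indegree = [0] * num_sccs
--     for u in scc_graph:
--         for v in scc_graph[u]:
--             indegree[v] += 1
--
--     queue = deque([u for u in range(num_sccs) if indegree[u] == 0])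
--     topo_order = []
--
--     while queue:
--         u = queue.popleft()
--         topo_order.append(u)
--         for v in scc_graph[u]:
--             indegree[v] -= 1
--             if indegree[v] == 0:
--                 queue.append(v)
--
--
--     for i in range(len(topo_order) - 1):
--         u = topo_order[i]
--         v = topo_order[i + 1]
--         if v not in scc_graph[u]:
--             return False
--
--     return True
-- ===== SOURCE B (Python) =====
-- def is_semi_connected(graph):
--     # pass 1: compute the reverse finish order with an explicit-stack DFS
--     visited = set()
--     rorder = []
--     for node in graph:
--         if node in visited:
--             continue
--         visited.add(node)
--         stack = [(node, 0)]
--         while stack: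
--             u, i = stack.pop()
--             adj = graph[u]
--             while i < len(adj) and adj[i] in visited:
--                 i += 1
--             if i < len(adj):
--                 v = adj[i]
--                 stack.append((u, i + 1))
--                 visited.add(v)
--                 stack.append((v, 0))
--             else:
--                 rorder.insert(0, u)
--     # transpose graph
--     transpose = {}
--     for u in graph:
--         for v in graph[u]:
--             transpose.setdefault(v, []).append(u)
--     # pass 2: label SCCs with an explicit-stack DFS on the transpose
--     component = {}
--     label = 0
--     for r in rorder:
--         if r in component:
--             continue
--         component[r] = label
--         stack = [(r, 0)]
--         while stack:
--             u, i = stack.pop()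
--             adj = transpose.get(u, [])
--             while i < len(adj) and adj[i] in component:
--                 i += 1
--             if i < len(adj):
--                 v = adj[i]
--                 stack.append((u, i + 1))
--                 component[v] = label
--                 stack.append((v, 0))
--         label += 1
--     if label == 1:
--         return True
--     # condensation kept as one flat insertion-ordered set of cross-SCC edges
--     cross = {}
--     for u in graph:
--         for v in graph[u]:
--             cu, cv = component[u], component[v]
--             if cu != cv and (cu, cv) not in cross:
--                 cross[(cu, cv)] = True
--     indegree = [0] * label
--     for (cu, cv) in cross:
--         indegree[cv] += 1
--     queue = [c for c in range(label) if indegree[c] == 0]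
--     topo = []
--     while queue:
--         u = queue.pop(0)
--         topo.append(u)
--         for (cu, cv) in cross:
--             if cu != u:
--                 continue
--             indegree[cv] -= 1
--             if indegree[cv] == 0:
--                 queue.append(cv)
--     return all((u, v) in cross for u, v in zip(topo, topo[1:]))
-- ===== Notes on version B (the rewrite author's own statement) =====
-- stated objective: alternative
-- what changed: Replaces both recursive Kosaraju DFS passes by explicit-stack iterative machines, builds the finish order back-to-front instead of appending and reversing, keeps the condensation as one flat insertion-ordered set of cross-SCC edges instead of a dict of per-SCC successor sets, and checks consecutive topo pairs with a pairwise zip.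
import Mathlib
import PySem

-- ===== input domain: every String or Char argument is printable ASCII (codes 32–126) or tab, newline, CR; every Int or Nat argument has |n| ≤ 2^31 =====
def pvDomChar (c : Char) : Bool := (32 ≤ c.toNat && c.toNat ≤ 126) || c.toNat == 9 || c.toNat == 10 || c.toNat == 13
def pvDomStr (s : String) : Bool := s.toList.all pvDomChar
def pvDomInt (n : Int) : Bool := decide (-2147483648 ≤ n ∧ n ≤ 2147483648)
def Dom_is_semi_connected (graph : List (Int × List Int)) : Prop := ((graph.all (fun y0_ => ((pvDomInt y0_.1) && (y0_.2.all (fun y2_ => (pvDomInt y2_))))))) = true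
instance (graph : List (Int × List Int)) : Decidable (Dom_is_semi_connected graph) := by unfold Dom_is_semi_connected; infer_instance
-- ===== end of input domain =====

-- B replaces A's two recursive Kosaraju DFS passes by explicit-stack iterative machines, builds the
-- finish order back-to-front, keeps the condensation as one flat insertion-ordered set of cross-SCC
-- edges instead of a dict of sets, and checks consecutive topo pairs with a pairwise zip (objective:
-- alternative; equal return value on every input where A returns, i.e. on Pre_).

-- ===== shared helpers: a DFS "algebra" (adjacency, visited test, entry/finish actions) =====
-- Both ports instantiate it; A drives it with the literal recursion `pvRec` (A's recursive dfs1/dfs2),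
-- B with the explicit-stack machine `pvRun` (Source B's while/stack loops).
structure PvDFS (σ : Type) where
  adj : Int → List Int
  univ : List Int
  enter : Int → σ → σ
  fin : Int → σ → σ
  visB : Int → σ → Bool
  h_closed : ∀ u v, v ∈ adj u → v ∈ univ
  h_enter_self : ∀ u s, visB u (enter u s) = true
  h_enter_mono : ∀ w u s, visB w s = true → visB w (enter u s) = true
  h_fin_vis : ∀ w u s, visB w (fin u s) = visB w s

-- number of not-yet-visited universe nodes (termination measure / fuel bound)
def pvMu {σ : Type} (a : PvDFS σ) (s : σ) : Nat := (a.univ.filter (fun x => !a.visB x s)).length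

theorem pvFilterLenLe {α : Type} (l : List α) (p q : α → Bool) (h : ∀ x ∈ l, p x = true → q x = true) :
    (l.filter p).length ≤ (l.filter q).length := by
  induction l with
  | nil => simp
  | cons x xs ih =>
    have ih' := ih (fun y hy => h y (List.mem_cons_of_mem _ hy))
    by_cases hp : p x = true
    · have hq := h x (List.mem_cons_self) hp
      simp [hp, hq]; omega
    · simp only [Bool.not_eq_true] at hp
      by_cases hq : q x = true <;> simp [hp, hq] <;> omega

theorem pvFilterLenLt {α : Type} (l : List α) (p q : α → Bool) (h : ∀ x ∈ l, p x = true → q x = true)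
    (x : α) (hx : x ∈ l) (hq : q x = true) (hp : p x = false) :
    (l.filter p).length < (l.filter q).length := by
  induction l with
  | nil => simp at hx
  | cons y ys ih =>
    have hmono := pvFilterLenLe ys p q (fun z hz => h z (List.mem_cons_of_mem _ hz))
    rcases List.mem_cons.mp hx with rfl | hx'
    · simp [hp, hq]; omega
    · have ih' := ih (fun z hz => h z (List.mem_cons_of_mem _ hz)) hx'
      by_cases hpy : p y = true
      · have hqy := h y (List.mem_cons_self) hpy
        simp [hpy, hqy]; omega
      · simp only [Bool.not_eq_true] at hpy
        by_cases hqy : q y = true <;> simp [hpy, hqy] <;> omega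

theorem pvMu_enter_lt {σ : Type} (a : PvDFS σ) (v : Int) (s : σ)
    (hv : v ∈ a.univ) (hnv : a.visB v s = false) : pvMu a (a.enter v s) < pvMu a s := by
  apply pvFilterLenLt a.univ _ _ _ v hv
  · simp [hnv]
  · simp [a.h_enter_self]
  · intro x _ hx
    simp only [Bool.not_eq_true'] at hx ⊢
    by_cases h : a.visB x s = true
    · rw [a.h_enter_mono x v s h] at hx; exact absurd hx (by simp)
    · simpa using h

theorem pvMu_fin {σ : Type} (a : PvDFS σ) (u : Int) (s : σ) : pvMu a (a.fin u s) = pvMu a s := by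
  unfold pvMu
  congr 1
  apply List.filter_congr
  intro x _
  rw [a.h_fin_vis]

-- ===== PORT A =====
-- A's recursive DFS: dfs(u): enter u; for v in adj(u): if not visited(v): dfs(v); finish u.
-- Fuel is a totality guard only; fuel `univ.length + 1` always suffices (pvMu ≤ univ.length).
def pvRec {σ : Type} (a : PvDFS σ) : Nat → Int → σ → σ
  | 0, _, s => s
  | n+1, u, s =>
      a.fin u ((a.adj u).foldl (fun t v => if a.visB v t then t else pvRec a n v t) (a.enter u s))

def pvGAdj (g : PySem.Dict Int (List Int)) : Int → List Int := fun u => g.getD u []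

def pvUniv (g : PySem.Dict Int (List Int)) : List Int := g.keys ++ g.values.flatten

theorem pvClosed (g : PySem.Dict Int (List Int)) : ∀ u v, v ∈ pvGAdj g u → v ∈ pvUniv g := by
  intro u v hv
  unfold pvGAdj at hv
  rw [PySem.Dict.getD_eq_get?_getD] at hv
  cases h : g.get? u with
  | none => rw [h] at hv; simp at hv
  | some l =>
    rw [h] at hv; simp at hv
    have hmem : (u, l) ∈ g.items := PySem.Dict.mem_items_of_get?_eq_some g h
    have hl : l ∈ g.values := by
      simp only [PySem.Dict.values]
      exact List.mem_map.mpr ⟨(u, l), hmem, rfl⟩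
    exact List.mem_append_right _ (List.mem_flatten.mpr ⟨l, hl, hv⟩)

-- pass 1 (finish order), A's variant: order appended at finish (dfs1's order.append(u))
def pvAlgA1 (g : PySem.Dict Int (List Int)) : PvDFS (PySem.Set Int × List Int) where
  adj := pvGAdj g
  univ := pvUniv g
  enter := fun u s => (PySem.Set.add s.1 u, s.2)
  fin := fun u s => (s.1, s.2 ++ [u])
  visB := fun v s => PySem.Set.contains s.1 v
  h_closed := pvClosed g
  h_enter_self := by
    intro u s; simp [PySem.Set.mem_add]
  h_enter_mono := by
    intro w u s h
    rw [PySem.Set.contains_iff] at h ⊢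
    exact (PySem.Set.mem_add _ _ _).mpr (Or.inl h)
  h_fin_vis := by intro w u s; rfl

-- pass 2 (SCC labelling on the transpose) — identical actions in A and B, so shared
def pvAlg2 (t : PySem.Dict Int (List Int)) (label : Int) : PvDFS (PySem.Dict Int Int) where
  adj := pvGAdj t
  univ := pvUniv t
  enter := fun u c => c.insert u label
  fin := fun _ c => c
  visB := fun u c => c.contains u
  h_closed := pvClosed t
  h_enter_self := by intro u s; exact PySem.Dict.contains_insert_self _ _ _
  h_enter_mono := by
    intro w u s h; rw [PySem.Dict.contains_insert]; simp [h]
  h_fin_vis := by intro w u s; rfl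

-- transpose[v].append(u)  (defaultdict(list)); identical line in Source B via transpose.get(v, [])
def pvTranspose (g : PySem.Dict Int (List Int)) : PySem.Dict Int (List Int) :=
  g.keys.foldl (fun t u => (pvGAdj g u).foldl (fun t v => t.modify v [] (fun l => l ++ [u])) t)
    PySem.Dict.empty

-- indegree[v] += 1  on the Python list `indegree`
def pvInc (ind : List Int) (v : Int) : List Int :=
  PySem.List.pySetD ind v (PySem.List.pyGetD ind v 0 + 1)

-- indegree[v] -= 1; if indegree[v] == 0: queue.append(v)   (state: queue × indegree)
def pvDecStep (qi : List Int × List Int) (v : Int) : List Int × List Int :=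
  let ind' := PySem.List.pySetD qi.2 v (PySem.List.pyGetD qi.2 v 0 - 1)
  if PySem.List.pyGetD ind' v 0 = 0 then (qi.1 ++ [v], ind') else (qi.1, ind')

-- A's Kahn loop: while queue: u = popleft; topo.append(u); for v in scc_graph[u]: …
def pvKahnA (d : PySem.Dict Int (PySem.Set Int)) : Nat → List Int → List Int → List Int → List Int
  | 0, _, topo, _ => topo
  | _+1, [], topo, _ => topo
  | fuel+1, u :: rest, topo, ind =>
      let st := (d.getD u PySem.Set.empty).foldl pvDecStep (rest, ind)
      pvKahnA d fuel st.1 (topo ++ [u]) st.2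

-- A's final loop: for i in range(len(topo)-1): if topo[i+1] not in scc_graph[topo[i]]: return False
def pvCheckA (d : PySem.Dict Int (PySem.Set Int)) : List Int → Bool
  | u :: v :: rest =>
      if ¬ (PySem.Set.contains (d.getD u PySem.Set.empty) v = true) then false
      else pvCheckA d (v :: rest)
  | _ => true

-- pass 1 driver: for node in graph: if node not in visited: dfs1(node)
def pvP1A (g : PySem.Dict Int (List Int)) : PySem.Set Int × List Int :=
  g.keys.foldl
    (fun s node => if (pvAlgA1 g).visB node s then s else pvRec (pvAlgA1 g) ((pvUniv g).length + 1) node s)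
    ((PySem.Set.empty : PySem.Set Int), ([] : List Int))

-- pass 2 driver over the given node sequence: if u not in component: dfs2(u, label); label += 1
def pvP2A (t : PySem.Dict Int (List Int)) (seq : List Int) : PySem.Dict Int Int × Int :=
  seq.foldl
    (fun (cl : PySem.Dict Int Int × Int) u =>
      if (pvAlg2 t cl.2).visB u cl.1 then cl
      else (pvRec (pvAlg2 t cl.2) ((pvUniv t).length + 1) u cl.1, cl.2 + 1))
    (PySem.Dict.empty, 0)

-- scc_graph[cu].add(cv)  (defaultdict(set))
def pvCondA (g : PySem.Dict Int (List Int)) (comp : PySem.Dict Int Int) :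
    PySem.Dict Int (PySem.Set Int) :=
  g.keys.foldl (fun d u => (pvGAdj g u).foldl (fun d v =>
      let cu := comp.getD u 0
      let cv := comp.getD v 0
      if cu ≠ cv then d.modify cu PySem.Set.empty (fun s => PySem.Set.add s cv) else d) d)
    (PySem.Dict.empty : PySem.Dict Int (PySem.Set Int))

-- everything after the num_sccs == 1 early return
def pvTailA (g : PySem.Dict Int (List Int)) (comp : PySem.Dict Int Int) (nscc : Int) : Bool :=
  let sccg := pvCondA g comp
  -- indegree = [0]*num_sccs; for u in scc_graph: for v in scc_graph[u]: indegree[v] += 1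
  let ind := sccg.keys.foldl (fun ind u => (sccg.getD u PySem.Set.empty).foldl pvInc ind)
    (List.replicate nscc.toNat (0 : Int))
  let queue := (PySem.List.pyRange 0 nscc 1).filter (fun u => PySem.List.pyGetD ind u 0 = 0)
  let fuelK := nscc.toNat + (sccg.keys.map (fun u => (sccg.getD u PySem.Set.empty).length)).sum + 1
  let topo := pvKahnA sccg fuelK queue [] ind
  pvCheckA sccg topo

def is_semi_connected (graph : List (Int × List Int)) : Bool :=
  let g := PySem.Dict.ofList graph
  let order := (pvP1A g).2
  let p2 := pvP2A (pvTranspose g) order.reverse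
  if p2.2 = 1 then true else pvTailA g p2.1 p2.2

-- ===== PORT B =====
-- Source B's explicit-stack DFS machine: frames (u, i) = "at node u, adjacency scanned up to i".
-- pop; skip visited successors; push the next unvisited one (entering it); finish u when exhausted.
def pvRun {σ : Type} (a : PvDFS σ) (stack : List (Int × Nat)) (s : σ) : σ :=
  match stack with
  | [] => s
  | (u, i) :: fr =>
    if h1 : i < (a.adj u).length then
      let v := (a.adj u)[i]
      if a.visB v s then pvRun a ((u, i+1) :: fr) s
      else pvRun a ((v, 0) :: (u, i+1) :: fr) (a.enter v s)
    else pvRun a fr (a.fin u s)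
termination_by (pvMu a s, ((stack.map (fun p => (a.adj p.1).length - p.2)).sum), stack.length)
decreasing_by
  all_goals simp_wf
  · apply Prod.Lex.right
    apply Prod.Lex.left
    omega
  · apply Prod.Lex.left
    exact pvMu_enter_lt a _ s (a.h_closed u _ (List.getElem_mem h1))
      (by rename_i hv; simp only [Bool.not_eq_true] at hv; exact hv)
  · rw [pvMu_fin]
    have h0 : (a.adj u).length - i = 0 := by omega
    apply Prod.Lex.right
    simp only [h0, Nat.zero_add]
    apply Prod.Lex.right
    simp

-- pass 1, B's variant: rorder.insert(0, u) — the finish order built back-to-front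
def pvAlgB1 (g : PySem.Dict Int (List Int)) : PvDFS (PySem.Set Int × List Int) where
  adj := pvGAdj g
  univ := pvUniv g
  enter := fun u s => (PySem.Set.add s.1 u, s.2)
  fin := fun u s => (s.1, u :: s.2)
  visB := fun v s => PySem.Set.contains s.1 v
  h_closed := pvClosed g
  h_enter_self := by
    intro u s; simp [PySem.Set.mem_add]
  h_enter_mono := by
    intro w u s h
    rw [PySem.Set.contains_iff] at h ⊢
    exact (PySem.Set.mem_add _ _ _).mpr (Or.inl h)
  h_fin_vis := by intro w u s; rfl

-- B's Kahn loop: successors of u read off the flat cross-edge set (skip pairs with p.1 ≠ u)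
def pvKahnB (c : PySem.Dict (Int × Int) Bool) : Nat → List Int → List Int → List Int → List Int
  | 0, _, topo, _ => topo
  | _+1, [], topo, _ => topo
  | fuel+1, u :: rest, topo, ind =>
      let st := c.keys.foldl (fun qi p => if p.1 ≠ u then qi else pvDecStep qi p.2) (rest, ind)
      pvKahnB c fuel st.1 (topo ++ [u]) st.2

-- pass 1 driver: visited.add(node); stack = [(node, 0)]; while stack: …
def pvP1B (g : PySem.Dict Int (List Int)) : PySem.Set Int × List Int :=
  g.keys.foldl
    (fun s node => if (pvAlgB1 g).visB node s then s
      else pvRun (pvAlgB1 g) [(node, 0)] ((pvAlgB1 g).enter node s))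
    ((PySem.Set.empty : PySem.Set Int), ([] : List Int))

-- pass 2 driver: component[r] = label; stack = [(r, 0)]; while stack: …; label += 1
def pvP2B (t : PySem.Dict Int (List Int)) (seq : List Int) : PySem.Dict Int Int × Int :=
  seq.foldl
    (fun (cl : PySem.Dict Int Int × Int) r =>
      if (pvAlg2 t cl.2).visB r cl.1 then cl
      else (pvRun (pvAlg2 t cl.2) [(r, 0)] ((pvAlg2 t cl.2).enter r cl.1), cl.2 + 1))
    (PySem.Dict.empty, 0)

-- cross[(cu, cv)] = True  (flat insertion-ordered set of cross-SCC edges)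
def pvCrossB (g : PySem.Dict Int (List Int)) (comp : PySem.Dict Int Int) :
    PySem.Dict (Int × Int) Bool :=
  g.keys.foldl (fun c u => (pvGAdj g u).foldl (fun c v =>
      let cu := comp.getD u 0
      let cv := comp.getD v 0
      if cu ≠ cv ∧ ¬ (c.contains (cu, cv) = true) then c.insert (cu, cv) true else c) c)
    (PySem.Dict.empty : PySem.Dict (Int × Int) Bool)

-- everything after the label == 1 early return
def pvTailB (g : PySem.Dict Int (List Int)) (comp : PySem.Dict Int Int) (label : Int) : Bool :=
  let cross := pvCrossB g comp
  -- for (cu, cv) in cross: indegree[cv] += 1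
  let ind := cross.keys.foldl (fun ind p => pvInc ind p.2) (List.replicate label.toNat (0 : Int))
  let queue := (PySem.List.pyRange 0 label 1).filter (fun c => PySem.List.pyGetD ind c 0 = 0)
  let topo := pvKahnB cross (label.toNat + cross.size + 1) queue [] ind
  (topo.zip topo.tail).all (fun p => cross.contains p)

def is_semi_connected_alt (graph : List (Int × List Int)) : Bool :=
  let g := PySem.Dict.ofList graph
  let rorder := (pvP1B g).2
  let p2 := pvP2B (pvTranspose g) rorder
  if p2.2 = 1 then true else pvTailB g p2.1 p2.2

-- ===== PRECONDITION & SPEC =====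
-- Pre_ excludes exactly the inputs where A raises KeyError: a successor that is not a key of the dict.
def Pre_is_semi_connected (graph : List (Int × List Int)) : Prop :=
  ∀ p ∈ (PySem.Dict.ofList graph).items, ∀ v ∈ p.2, (PySem.Dict.ofList graph).contains v = true
instance (graph : List (Int × List Int)) : Decidable (Pre_is_semi_connected graph) := by
  unfold Pre_is_semi_connected; infer_instance

def pvWitness_is_semi_connected : (List (Int × List Int)) := [(0, [1]), (1, [0])]

def Spec_is_semi_connected (graph : List (Int × List Int)) (out : Bool) : Prop := out = is_semi_connected_alt graph
instance (graph : List (Int × List Int)) (out : Bool) : Decidable (Spec_is_semi_connected graph out) := by unfold Spec_is_semi_connected; infer_instance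

-- ===== CLAIM (what is proved, stated in full; the proofs are below) =====
def Claim_equal_is_semi_connected : Prop := ∀ (graph : List (Int × List Int)), Dom_is_semi_connected graph → Pre_is_semi_connected graph → Spec_is_semi_connected graph (is_semi_connected graph)

-- ===== LEMMAS AND PROOFS =====

-- visited-monotonicity of A's recursion
theorem pvVis_rec_mono {σ : Type} (a : PvDFS σ) :
    ∀ n u s w, a.visB w s = true → a.visB w (pvRec a n u s) = true := by
  intro n
  induction n with
  | zero => intro u s w h; simpa [pvRec] using h
  | succ n ih =>
    intro u s w h
    simp only [pvRec]
    rw [a.h_fin_vis]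
    have hstart : a.visB w (a.enter u s) = true := a.h_enter_mono _ _ _ h
    generalize a.enter u s = t at hstart
    induction (a.adj u) generalizing t with
    | nil => simpa using hstart
    | cons v vs ihl =>
      simp only [List.foldl_cons]
      by_cases hv : a.visB v t = true
      · rw [if_pos hv]; exact ihl _ hstart
      · rw [if_neg hv]; exact ihl _ (ih v t w hstart)

theorem pvMu_mono_of_vis {σ : Type} (a : PvDFS σ) {s s' : σ}
    (h : ∀ w, a.visB w s = true → a.visB w s' = true) : pvMu a s' ≤ pvMu a s := by
  apply pvFilterLenLe
  intro x _ hx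
  simp only [Bool.not_eq_true'] at hx ⊢
  by_cases hxs : a.visB x s = true
  · rw [h x hxs] at hx; exact absurd hx (by simp)
  · simpa using hxs

theorem pvMu_rec_le {σ : Type} (a : PvDFS σ) (n : Nat) (u : Int) (s : σ) :
    pvMu a (pvRec a n u s) ≤ pvMu a s :=
  pvMu_mono_of_vis a (fun w hw => pvVis_rec_mono a n u s w hw)

theorem pvMu_pos {σ : Type} (a : PvDFS σ) (u : Int) (s : σ)
    (hu : u ∈ a.univ) (hv : a.visB u s = false) : 1 ≤ pvMu a s := by
  have : u ∈ a.univ.filter (fun x => !a.visB x s) := List.mem_filter.mpr ⟨hu, by simp [hv]⟩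
  have := List.length_pos_of_mem this
  unfold pvMu
  omega

theorem pvMu_le_univ {σ : Type} (a : PvDFS σ) (s : σ) : pvMu a s ≤ a.univ.length :=
  List.length_filter_le _ _

-- result of A's recursion does not depend on the fuel once the fuel dominates pvMu
theorem pvRec_fuel {σ : Type} (a : PvDFS σ) :
    ∀ k s u n m, pvMu a s ≤ k → pvMu a s ≤ n → pvMu a s ≤ m → u ∈ a.univ → a.visB u s = false →
      pvRec a n u s = pvRec a m u s := by
  intro k
  induction k using Nat.strong_induction_on with
  | _ k ih =>
    intro s u n m hk hn hm hu hv
    have h1 : 1 ≤ pvMu a s := pvMu_pos a u s hu hv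
    obtain ⟨n', rfl⟩ : ∃ n', n = n' + 1 := ⟨n - 1, by omega⟩
    obtain ⟨m', rfl⟩ : ∃ m', m = m' + 1 := ⟨m - 1, by omega⟩
    simp only [pvRec]
    congr 1
    have hμe : pvMu a (a.enter u s) < pvMu a s := pvMu_enter_lt a u s hu hv
    have hsub : ∀ v ∈ a.adj u, v ∈ a.univ := fun v hv' => a.h_closed u v hv'
    have key : ∀ (l : List Int), (∀ v ∈ l, v ∈ a.univ) → ∀ t, pvMu a t < k → pvMu a t ≤ n' → pvMu a t ≤ m' →
        l.foldl (fun t v => if a.visB v t then t else pvRec a n' v t) t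
          = l.foldl (fun t v => if a.visB v t then t else pvRec a m' v t) t := by
      intro l
      induction l with
      | nil => intro _ t _ _ _; rfl
      | cons v vs ihl =>
        intro hlu t htk htn htm
        simp only [List.foldl_cons]
        by_cases hvt : a.visB v t = true
        · rw [if_pos hvt, if_pos hvt]
          exact ihl (fun w hw => hlu w (List.mem_cons_of_mem _ hw)) t htk htn htm
        · have hvt' : a.visB v t = false := by simpa using hvt
          have hvu : v ∈ a.univ := hlu v List.mem_cons_self
          have heq : pvRec a n' v t = pvRec a m' v t :=
            ih (pvMu a t) htk t v n' m' le_rfl htn htm hvu hvt'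
          rw [if_neg hvt, if_neg hvt, heq]
          have hle : pvMu a (pvRec a m' v t) ≤ pvMu a t := pvMu_rec_le a m' v t
          exact ihl (fun w hw => hlu w (List.mem_cons_of_mem _ hw)) _ (by omega) (by omega) (by omega)
    exact key (a.adj u) hsub (a.enter u s) (by omega) (by omega) (by omega)

-- defunctionalized continuation semantics of the stack machine
def pvCont {σ : Type} (a : PvDFS σ) : List (Int × Nat) → σ → σ
  | [], s => s
  | (u, i) :: fr, s =>
      pvCont a fr (a.fin u (((a.adj u).drop i).foldl
        (fun t v => if a.visB v t then t else pvRec a a.univ.length v t) s))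

-- the machine computes the continuation semantics
theorem pvRun_eq_cont {σ : Type} (a : PvDFS σ) :
    ∀ stack s, pvRun a stack s = pvCont a stack s := by
  intro stack s
  fun_induction pvRun a stack s with
  | case1 s => rfl
  | case2 s u i fr h1 v hv ih =>
    rw [ih]
    simp only [pvCont]
    rw [List.drop_eq_getElem_cons h1]
    simp only [List.foldl_cons]
    have hvv : (a.adj u)[i] = v := rfl
    rw [hvv, if_pos hv]
  | case3 s u i fr h1 v hv ih =>
    rw [ih]
    simp only [pvCont, List.drop_zero]
    have hvf : a.visB v s = false := by simpa using hv
    have heq : pvRec a a.univ.length v s = pvRec a (a.univ.length + 1) v s :=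
      pvRec_fuel a (pvMu a s) s v _ _ le_rfl (pvMu_le_univ a s) (by have := pvMu_le_univ a s; omega)
        (a.h_closed u v (by exact List.getElem_mem h1)) hvf
    rw [List.drop_eq_getElem_cons h1]
    simp only [List.foldl_cons]
    have hvv : (a.adj u)[i] = v := rfl
    rw [hvv, if_neg hv]
    have hrec : pvRec a (a.univ.length + 1) v s
        = a.fin v ((a.adj v).foldl (fun t w => if a.visB w t then t else pvRec a a.univ.length w t)
            (a.enter v s)) := by
      simp only [pvRec]
    rw [← hrec, ← heq]
  | case4 s u i fr h1 ih =>
    rw [ih]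
    simp only [pvCont]
    rw [List.drop_eq_nil_of_le (by omega)]
    rfl

theorem pvRun_single {σ : Type} (a : PvDFS σ) (u : Int) (s : σ) :
    pvRun a [(u, 0)] (a.enter u s) = pvRec a (a.univ.length + 1) u s := by
  rw [pvRun_eq_cont]
  simp only [pvCont, List.drop_zero]
  rfl



-- ===== pass 1: B's back-to-front order is the reverse of A's appended order =====
theorem pvRec_rev (g : PySem.Dict Int (List Int)) :
    ∀ n u (p : PySem.Set Int × List Int),
      pvRec (pvAlgB1 g) n u (p.1, p.2.reverse)
        = ((pvRec (pvAlgA1 g) n u p).1, (pvRec (pvAlgA1 g) n u p).2.reverse) := by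
  intro n
  induction n with
  | zero => intro u p; rfl
  | succ n ih =>
    intro u p
    simp only [pvRec]
    have aux : ∀ (l : List Int) (q : PySem.Set Int × List Int),
        l.foldl (fun t v => if (pvAlgB1 g).visB v t then t else pvRec (pvAlgB1 g) n v t)
            (q.1, q.2.reverse)
          = ((l.foldl (fun t v => if (pvAlgA1 g).visB v t then t else pvRec (pvAlgA1 g) n v t) q).1,
             (l.foldl (fun t v => if (pvAlgA1 g).visB v t then t else pvRec (pvAlgA1 g) n v t) q).2.reverse) := by
      intro l
      induction l with
      | nil => intro q; rfl
      | cons v vs ihl =>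
        intro q
        simp only [List.foldl_cons]
        by_cases hv : PySem.Set.contains q.1 v = true
        · have hvB : (pvAlgB1 g).visB v (q.1, q.2.reverse) = true := hv
          have hvA : (pvAlgA1 g).visB v q = true := hv
          rw [if_pos hvB, if_pos hvA]
          exact ihl q
        · have hvB : ¬ ((pvAlgB1 g).visB v (q.1, q.2.reverse) = true) := hv
          have hvA : ¬ ((pvAlgA1 g).visB v q = true) := hv
          rw [if_neg hvB, if_neg hvA]
          rw [ih v q]
          exact ihl (pvRec (pvAlgA1 g) n v q)
    have hstart : (pvAlgB1 g).enter u (p.1, p.2.reverse)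
        = (((pvAlgA1 g).enter u p).1, ((pvAlgA1 g).enter u p).2.reverse) := rfl
    rw [hstart, aux (((pvAlgB1 g)).adj u) ((pvAlgA1 g).enter u p)]
    have hadj : (pvAlgB1 g).adj u = (pvAlgA1 g).adj u := rfl
    rw [hadj]
    simp [pvAlgA1, pvAlgB1, List.reverse_append]

theorem pvP1_rev (g : PySem.Dict Int (List Int)) :
    pvP1B g = ((pvP1A g).1, (pvP1A g).2.reverse) := by
  unfold pvP1A pvP1B
  have aux : ∀ (l : List Int) (p : PySem.Set Int × List Int),
      l.foldl (fun s node => if (pvAlgB1 g).visB node s then s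
          else pvRun (pvAlgB1 g) [(node, 0)] ((pvAlgB1 g).enter node s)) (p.1, p.2.reverse)
        = ((l.foldl (fun s node => if (pvAlgA1 g).visB node s then s
            else pvRec (pvAlgA1 g) ((pvUniv g).length + 1) node s) p).1,
           (l.foldl (fun s node => if (pvAlgA1 g).visB node s then s
            else pvRec (pvAlgA1 g) ((pvUniv g).length + 1) node s) p).2.reverse) := by
    intro l
    induction l with
    | nil => intro p; rfl
    | cons v vs ihl =>
      intro p
      simp only [List.foldl_cons]
      by_cases hv : PySem.Set.contains p.1 v = true
      · have hvB : (pvAlgB1 g).visB v (p.1, p.2.reverse) = true := hv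
        have hvA : (pvAlgA1 g).visB v p = true := hv
        rw [if_pos hvB, if_pos hvA]
        exact ihl p
      · have hvB : ¬ ((pvAlgB1 g).visB v (p.1, p.2.reverse) = true) := hv
        have hvA : ¬ ((pvAlgA1 g).visB v p = true) := hv
        rw [if_neg hvB, if_neg hvA]
        rw [pvRun_single (pvAlgB1 g) v (p.1, p.2.reverse)]
        have hu : (pvAlgB1 g).univ.length = (pvUniv g).length := rfl
        rw [hu, pvRec_rev g ((pvUniv g).length + 1) v p]
        exact ihl (pvRec (pvAlgA1 g) ((pvUniv g).length + 1) v p)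
  have h0 : ((PySem.Set.empty : PySem.Set Int), ([] : List Int))
      = (((PySem.Set.empty : PySem.Set Int), ([] : List Int)).1,
         ((PySem.Set.empty : PySem.Set Int), ([] : List Int)).2.reverse) := rfl
  rw [h0, aux]
  rfl

-- ===== pass 2: same actions, machine vs recursion =====
theorem pvP2_eq (t : PySem.Dict Int (List Int)) (seq : List Int) :
    pvP2B t seq = pvP2A t seq := by
  unfold pvP2A pvP2B
  congr 1
  funext cl r
  by_cases hv : (pvAlg2 t cl.2).visB r cl.1 = true
  · rw [if_pos hv, if_pos hv]
  · rw [if_neg hv, if_neg hv]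
    rw [pvRun_single (pvAlg2 t cl.2) r cl.1]
    rfl


-- ===== generic list helpers =====
theorem pvFoldRel {α σ τ : Type} (R : σ → τ → Prop) (fA : σ → α → σ) (fB : τ → α → τ)
    (h : ∀ s t x, R s t → R (fA s x) (fB t x)) :
    ∀ (l : List α) s t, R s t → R (l.foldl fA s) (l.foldl fB t) := by
  intro l
  induction l with
  | nil => intro s t hst; exact hst
  | cons x xs ih => intro s t hst; exact ih _ _ (h s t x hst)

theorem pvFlatMapCongr {α β : Type} (l : List α) (f g : α → List β)
    (h : ∀ a ∈ l, f a = g a) : l.flatMap f = l.flatMap g := by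
  induction l with
  | nil => rfl
  | cons x xs ih =>
    simp only [List.flatMap_cons]
    rw [h x List.mem_cons_self, ih (fun a ha => h a (List.mem_cons_of_mem _ ha))]

theorem pvFoldlFlatMap' {α γ β : Type} (f : β → γ → β) (g : α → List γ) :
    ∀ (l : List α) (b : β), (l.flatMap g).foldl f b = l.foldl (fun b a => (g a).foldl f b) b := by
  intro l
  induction l with
  | nil => intro b; rfl
  | cons x xs ih =>
    intro b
    simp only [List.flatMap_cons, List.foldl_append, List.foldl_cons]
    exact ih _

theorem pvFoldlPerm {α β : Type} (f : β → α → β)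
    (hcomm : ∀ b x y, f (f b x) y = f (f b y) x) :
    ∀ {l1 l2 : List α}, l1.Perm l2 → ∀ b, l1.foldl f b = l2.foldl f b := by
  intro l1 l2 hp
  induction hp with
  | nil => intro b; rfl
  | cons x _ ih => intro b; simp only [List.foldl_cons]; exact ih _
  | swap x y l => intro b; simp only [List.foldl_cons]; rw [hcomm]
  | trans _ _ ih1 ih2 => intro b; rw [ih1, ih2]

theorem pvFoldlSkip {α β : Type} (q : α → Bool) (h : β → α → β) :
    ∀ (l : List α) (s : β),
      l.foldl (fun s p => if q p = true then h s p else s) s = (l.filter q).foldl h s := by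
  intro l
  induction l with
  | nil => intro s; rfl
  | cons x xs ih =>
    intro s
    by_cases hx : q x = true
    · simp only [List.foldl_cons, List.filter_cons, hx]
      simp only [if_true, List.foldl_cons]
      exact ih _
    · simp only [Bool.not_eq_true] at hx
      simp only [List.foldl_cons, List.filter_cons, hx, Bool.false_eq_true, if_false]
      exact ih _

-- grouping a pair list by its (nodup) keys is a permutation of the list
theorem pvGroupPerm {V : Type} :
    ∀ (keys : List Int) (l : List (Int × V)), keys.Nodup → (∀ p ∈ l, p.1 ∈ keys) →
      (keys.flatMap (fun u => l.filter (fun p => p.1 == u))).Perm l := by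
  intro keys
  induction keys with
  | nil =>
    intro l _ hl
    have : l = [] := List.eq_nil_iff_forall_not_mem.mpr (fun p hp => by simpa using hl p hp)
    simp [this]
  | cons u rest ih =>
    intro l hnd hl
    simp only [List.flatMap_cons]
    have hu_notin : u ∉ rest := (List.nodup_cons.mp hnd).1
    have hrest_nd : rest.Nodup := (List.nodup_cons.mp hnd).2
    have hcongr : rest.flatMap (fun w => l.filter (fun p => p.1 == w))
        = rest.flatMap (fun w => (l.filter (fun p => !(p.1 == u))).filter (fun p => p.1 == w)) := by
      apply pvFlatMapCongr
      intro w hw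
      rw [List.filter_filter]
      apply List.filter_congr
      intro p _
      by_cases hpw : p.1 = w
      · have hwu : w ≠ u := by rintro rfl; exact hu_notin hw
        simp [hpw, hwu]
      · simp [hpw]
    rw [hcongr]
    have hsub : ∀ p ∈ l.filter (fun p => !(p.1 == u)), p.1 ∈ rest := by
      intro p hp
      have hmem := List.mem_of_mem_filter hp
      have hne : ¬ (p.1 == u) = true := by
        have := List.of_mem_filter hp; simpa using this
      have := hl p hmem
      rcases List.mem_cons.mp this with h | h
      · exact absurd (by simp [h]) hne
      · exact h
    have hperm := ih (l.filter (fun p => !(p.1 == u))) hrest_nd hsub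
    exact List.Perm.trans (List.Perm.append_left _ hperm) (List.filter_append_perm _ l)

-- ===== pvInc: increments at (python-indexed) cells commute =====
theorem pvIdx_lt {n : Nat} {i : Int} {k : Nat} (h : PySem.List.pyIdx? n i = some k) : k < n := by
  unfold PySem.List.pyIdx? at h
  split_ifs at h with h1 h2 h3 <;> simp_all <;> omega

theorem pvInc_some {ind : List Int} {v : Int} {k : Nat}
    (h : PySem.List.pyIdx? ind.length v = some k) :
    pvInc ind v = ind.set k ((ind[k]?.getD 0) + 1) := by
  unfold pvInc PySem.List.pySetD PySem.List.pySet? PySem.List.pyGetD PySem.List.pyGet?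
  rw [h]
  rfl

theorem pvInc_none {ind : List Int} {v : Int}
    (h : PySem.List.pyIdx? ind.length v = none) : pvInc ind v = ind := by
  unfold pvInc PySem.List.pySetD PySem.List.pySet?
  rw [h]
  rfl

theorem pvInc_length (ind : List Int) (v : Int) : (pvInc ind v).length = ind.length := by
  cases h : PySem.List.pyIdx? ind.length v with
  | none => rw [pvInc_none h]
  | some k => rw [pvInc_some h, List.length_set]

theorem pvInc_comm (ind : List Int) (v1 v2 : Int) :
    pvInc (pvInc ind v1) v2 = pvInc (pvInc ind v2) v1 := by
  cases h1 : PySem.List.pyIdx? ind.length v1 with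
  | none =>
    rw [pvInc_none h1]
    have h1' : PySem.List.pyIdx? (pvInc ind v2).length v1 = none := by rw [pvInc_length]; exact h1
    rw [pvInc_none h1']
  | some k1 =>
    cases h2 : PySem.List.pyIdx? ind.length v2 with
    | none =>
      rw [pvInc_none h2]
      have h2' : PySem.List.pyIdx? (pvInc ind v1).length v2 = none := by rw [pvInc_length]; exact h2
      rw [pvInc_none h2']
    | some k2 =>
      have hk1 : k1 < ind.length := pvIdx_lt h1
      have hk2 : k2 < ind.length := pvIdx_lt h2
      have h1' : PySem.List.pyIdx? (pvInc ind v2).length v1 = some k1 := by rw [pvInc_length]; exact h1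
      have h2' : PySem.List.pyIdx? (pvInc ind v1).length v2 = some k2 := by rw [pvInc_length]; exact h2
      rw [pvInc_some h1', pvInc_some h2', pvInc_some h1, pvInc_some h2]
      by_cases hk : k1 = k2
      · subst hk
        rfl
      · rw [List.getElem?_set_ne (by omega), List.getElem?_set_ne (by omega), List.set_comm _ _ (by omega : k1 ≠ k2)]

-- ===== condensation / Kahn / final check: flat edge set vs dict of sets =====

-- the scan invariant relating A's dict-of-sets condensation to B's flat cross-edge set
theorem pvCondStep (comp : PySem.Dict Int Int) (u : Int) :
    ∀ (d : PySem.Dict Int (PySem.Set Int)) (c : PySem.Dict (Int × Int) Bool) (v : Int),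
      ((∀ x : Int, ((c.keys.filter (fun p => p.1 == x)).map Prod.snd) = d.getD x PySem.Set.empty)
        ∧ d.keys = PySem.Set.ofList (c.keys.map Prod.fst)) →
      ((∀ x : Int, ((((fun c v =>
              let cu := comp.getD u 0
              let cv := comp.getD v 0
              if cu ≠ cv ∧ ¬ (c.contains (cu, cv) = true) then c.insert (cu, cv) true else c) c v
            : PySem.Dict (Int × Int) Bool).keys.filter (fun p => p.1 == x)).map Prod.snd)
          = ((fun d v =>
              let cu := comp.getD u 0
              let cv := comp.getD v 0
              if cu ≠ cv then d.modify cu PySem.Set.empty (fun s => PySem.Set.add s cv) else d) d v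
            : PySem.Dict Int (PySem.Set Int)).getD x PySem.Set.empty)
        ∧ ((fun d v =>
              let cu := comp.getD u 0
              let cv := comp.getD v 0
              if cu ≠ cv then d.modify cu PySem.Set.empty (fun s => PySem.Set.add s cv) else d) d v).keys
          = PySem.Set.ofList ((((fun c v =>
              let cu := comp.getD u 0
              let cv := comp.getD v 0
              if cu ≠ cv ∧ ¬ (c.contains (cu, cv) = true) then c.insert (cu, cv) true else c) c v).keys.map Prod.fst))) := by
  intro d c v hR
  obtain ⟨h2, hK⟩ := hR
  simp only []
  set cu := comp.getD u 0 with hcu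
  set cv := comp.getD v 0 with hcvdef
  by_cases hne : cu = cv
  · rw [if_neg (by simp [hne]), if_neg (by simp [hne])]
    exact ⟨h2, hK⟩
  · by_cases hcon : c.contains (cu, cv) = true
    · rw [if_neg (by simp [hcon]), if_pos hne]
      have hmem_pair : (cu, cv) ∈ c.keys := (PySem.Dict.contains_iff_mem_keys _ _).mp hcon
      have hcvmem : cv ∈ d.getD cu PySem.Set.empty := by
        rw [← h2 cu]
        exact List.mem_map.mpr ⟨(cu, cv), List.mem_filter.mpr ⟨hmem_pair, by simp⟩, rfl⟩
      have hdcon : d.contains cu = true := by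
        by_contra h
        have hf : d.contains cu = false := by revert h; cases d.contains cu <;> simp
        rw [PySem.Dict.getD_of_not_contains d _ hf] at hcvmem
        simp [PySem.Set.empty] at hcvmem
      constructor
      · intro x
        rw [PySem.Dict.getD_modify]
        by_cases hx : x = cu
        · subst hx
          rw [if_pos rfl, PySem.Set.add_of_mem hcvmem]
          exact h2 _
        · rw [if_neg hx]
          exact h2 x
      · rw [PySem.Dict.keys_modify, PySem.Dict.keys_insert_of_contains _ _ hdcon]
        exact hK
    · have hconf : c.contains (cu, cv) = false := by revert hcon; cases c.contains (cu, cv) <;> simp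
      rw [if_pos ⟨hne, hcon⟩, if_pos hne]
      have hkeys' : (c.insert (cu, cv) true).keys = c.keys ++ [(cu, cv)] :=
        PySem.Dict.keys_insert_of_not_contains c true hconf
      have hcvnot : cv ∉ d.getD cu PySem.Set.empty := by
        intro hmem
        rw [← h2 cu] at hmem
        obtain ⟨p, hp, hsnd⟩ := List.mem_map.mp hmem
        obtain ⟨hpk, hpu⟩ := List.mem_filter.mp hp
        have hp1 : p.1 = cu := by simpa using hpu
        have hpe : p = (cu, cv) := by cases p; simp_all
        rw [hpe] at hpk
        rw [(PySem.Dict.contains_iff_mem_keys c _).mpr hpk] at hconf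
        simp at hconf
      constructor
      · intro x
        rw [hkeys', List.filter_append, PySem.Dict.getD_modify]
        by_cases hx : x = cu
        · subst hx
          rw [if_pos rfl, PySem.Set.add_of_not_mem hcvnot]
          simp only [List.filter_cons, List.filter_nil]
          rw [if_pos (by simp)]
          rw [List.map_append, h2 _]
          rfl
        · rw [if_neg hx]
          simp only [List.filter_cons, List.filter_nil]
          rw [if_neg (by simp; exact fun h => hx h.symm)]
          rw [List.append_nil]
          exact h2 x
      · rw [PySem.Dict.keys_modify, hkeys', List.map_append]
        simp only [List.map_cons, List.map_nil]
        rw [PySem.Set.ofList_append_singleton, ← hK]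
        by_cases hdc : d.contains cu = true
        · rw [PySem.Dict.keys_insert_of_contains _ _ hdc]
          rw [PySem.Set.add_of_mem ((PySem.Dict.contains_iff_mem_keys d cu).mp hdc)]
        · have hdcf : d.contains cu = false := by revert hdc; cases d.contains cu <;> simp
          rw [PySem.Dict.keys_insert_of_not_contains d _ hdcf]
          rw [PySem.Set.add_of_not_mem (fun hmem => by
            rw [(PySem.Dict.contains_iff_mem_keys d cu).mpr hmem] at hdcf; simp at hdcf)]

theorem pvCond_inv (g : PySem.Dict Int (List Int)) (comp : PySem.Dict Int Int) :
    (∀ x : Int, (((pvCrossB g comp).keys.filter (fun p => p.1 == x)).map Prod.snd)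
        = (pvCondA g comp).getD x PySem.Set.empty)
    ∧ (pvCondA g comp).keys = PySem.Set.ofList ((pvCrossB g comp).keys.map Prod.fst) := by
  unfold pvCondA pvCrossB
  refine pvFoldRel
    (R := fun (d : PySem.Dict Int (PySem.Set Int)) (c : PySem.Dict (Int × Int) Bool) =>
      (∀ x : Int, ((c.keys.filter (fun p => p.1 == x)).map Prod.snd) = d.getD x PySem.Set.empty)
      ∧ d.keys = PySem.Set.ofList (c.keys.map Prod.fst)) _ _
    (fun d c u hR => pvFoldRel _ _ _ (fun d c v hR' => pvCondStep comp u d c v hR') (pvGAdj g u) d c hR)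
    g.keys _ _ ⟨by intro x; simp [PySem.Dict.keys_empty, PySem.Dict.getD_empty, PySem.Set.empty],
      by simp [PySem.Dict.keys_empty]⟩

theorem pvMemIff (g : PySem.Dict Int (List Int)) (comp : PySem.Dict Int Int) (u v : Int) :
    (pvCrossB g comp).contains (u, v)
      = PySem.Set.contains ((pvCondA g comp).getD u PySem.Set.empty) v := by
  have h2 := (pvCond_inv g comp).1
  rw [Bool.eq_iff_iff]
  constructor
  · intro hc
    have hmem := (PySem.Dict.contains_iff_mem_keys _ _).mp hc
    rw [PySem.Set.contains_iff, ← h2 u]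
    exact List.mem_map.mpr ⟨(u, v), List.mem_filter.mpr ⟨hmem, by simp⟩, rfl⟩
  · intro hs
    rw [PySem.Set.contains_iff, ← h2 u] at hs
    obtain ⟨p, hp, hsnd⟩ := List.mem_map.mp hs
    obtain ⟨hpk, hpu⟩ := List.mem_filter.mp hp
    have hp1 : p.1 = u := by simpa using hpu
    have hpe : p = (u, v) := by cases p; simp_all
    exact (PySem.Dict.contains_iff_mem_keys _ _).mpr (hpe ▸ hpk)

theorem pvKeys1 (g : PySem.Dict Int (List Int)) (comp : PySem.Dict Int Int) :
    ∀ p ∈ (pvCrossB g comp).keys, p.1 ∈ (pvCondA g comp).keys := by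
  intro p hp
  have h2 := (pvCond_inv g comp).1
  have hmem : p.2 ∈ (pvCondA g comp).getD p.1 PySem.Set.empty := by
    rw [← h2 p.1]
    exact List.mem_map.mpr ⟨p, List.mem_filter.mpr ⟨hp, by simp⟩, rfl⟩
  by_cases hdc : (pvCondA g comp).contains p.1 = true
  · exact (PySem.Dict.contains_iff_mem_keys _ _).mp hdc
  · have hf : (pvCondA g comp).contains p.1 = false := by
      revert hdc; cases (pvCondA g comp).contains p.1 <;> simp
    rw [PySem.Dict.getD_of_not_contains _ _ hf] at hmem
    simp [PySem.Set.empty] at hmem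

theorem pvCondNodup (g : PySem.Dict Int (List Int)) (comp : PySem.Dict Int Int) :
    (pvCondA g comp).keys.Nodup := by
  rw [(pvCond_inv g comp).2]
  exact PySem.Set.nodup_ofList _

theorem pvCondPerm (g : PySem.Dict Int (List Int)) (comp : PySem.Dict Int Int) :
    ((pvCondA g comp).keys.flatMap
        (fun u => (pvCrossB g comp).keys.filter (fun p => p.1 == u))).Perm
      (pvCrossB g comp).keys :=
  pvGroupPerm _ _ (pvCondNodup g comp) (pvKeys1 g comp)

theorem pvIndeg_eq (g : PySem.Dict Int (List Int)) (comp : PySem.Dict Int Int) (init : List Int) :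
    (pvCondA g comp).keys.foldl
        (fun ind u => ((pvCondA g comp).getD u PySem.Set.empty).foldl pvInc ind) init
      = (pvCrossB g comp).keys.foldl (fun ind p => pvInc ind p.2) init := by
  have h2 := (pvCond_inv g comp).1
  have hfun : (fun (ind : List Int) u => ((pvCondA g comp).getD u PySem.Set.empty).foldl pvInc ind)
      = fun ind u => ((pvCrossB g comp).keys.filter (fun p => p.1 == u)).foldl
          (fun ind p => pvInc ind p.2) ind := by
    funext ind u
    rw [← h2 u, List.foldl_map]
  rw [hfun, ← pvFoldlFlatMap']
  exact pvFoldlPerm _ (fun b x y => pvInc_comm b x.2 y.2) (pvCondPerm g comp) init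

theorem pvFuel_eq (g : PySem.Dict Int (List Int)) (comp : PySem.Dict Int Int) :
    ((pvCondA g comp).keys.map (fun u => ((pvCondA g comp).getD u PySem.Set.empty).length)).sum
      = (pvCrossB g comp).size := by
  have h2 := (pvCond_inv g comp).1
  have hsz : (pvCrossB g comp).size = (pvCrossB g comp).keys.length := by
    simp [PySem.Dict.size, PySem.Dict.keys]
  rw [hsz, ← (pvCondPerm g comp).length_eq, List.length_flatMap]
  congr 1
  apply List.map_congr_left
  intro u _
  rw [← h2 u, List.length_map]

theorem pvKahn_eq (g : PySem.Dict Int (List Int)) (comp : PySem.Dict Int Int) :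
    ∀ fuel queue topo ind,
      pvKahnA (pvCondA g comp) fuel queue topo ind
        = pvKahnB (pvCrossB g comp) fuel queue topo ind := by
  have h2 := (pvCond_inv g comp).1
  intro fuel
  induction fuel with
  | zero => intro queue topo ind; rfl
  | succ n ih =>
    intro queue topo ind
    cases queue with
    | nil => rfl
    | cons u rest =>
      simp only [pvKahnA, pvKahnB]
      have hg : (fun (qi : List Int × List Int) (p : Int × Int) =>
            if p.1 ≠ u then qi else pvDecStep qi p.2)
          = (fun qi p => if ((p.1 == u) : Bool) = true then pvDecStep qi p.2 else qi) := by
        funext qi p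
        by_cases hp : p.1 = u <;> simp [hp]
      have hstep : (pvCrossB g comp).keys.foldl
            (fun qi p => if p.1 ≠ u then qi else pvDecStep qi p.2) (rest, ind)
          = ((pvCondA g comp).getD u PySem.Set.empty).foldl pvDecStep (rest, ind) := by
        rw [hg, pvFoldlSkip, ← h2 u, List.foldl_map]
      rw [hstep]
      exact ih _ _ _

theorem pvCheck_eq (g : PySem.Dict Int (List Int)) (comp : PySem.Dict Int Int) :
    ∀ topo, pvCheckA (pvCondA g comp) topo
      = (topo.zip topo.tail).all (fun p => (pvCrossB g comp).contains p) := by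
  intro topo
  induction topo with
  | nil => rfl
  | cons u rest ih =>
    cases rest with
    | nil => rfl
    | cons v rest2 =>
      simp only [pvCheckA, List.tail_cons, List.zip_cons_cons, List.all_cons]
      rw [pvMemIff g comp u v]
      by_cases h : PySem.Set.contains ((pvCondA g comp).getD u PySem.Set.empty) v = true
      · rw [if_neg (not_not_intro h), h, Bool.true_and, ih]
        simp [List.tail_cons]
      · have hf : PySem.Set.contains ((pvCondA g comp).getD u PySem.Set.empty) v = false := by
          revert h; cases PySem.Set.contains ((pvCondA g comp).getD u PySem.Set.empty) v <;> simp
        rw [if_pos (by rw [hf]; simp), hf, Bool.false_and]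

theorem pvTail_eq (g : PySem.Dict Int (List Int)) (comp : PySem.Dict Int Int) (nscc : Int) :
    pvTailA g comp nscc = pvTailB g comp nscc := by
  simp only [pvTailA, pvTailB]
  rw [pvIndeg_eq g comp, pvFuel_eq g comp, pvKahn_eq g comp, pvCheck_eq g comp]

-- ===== VERDICT (by name: the statement is the Claim_ definition above) =====
theorem is_semi_connected_spec : Claim_equal_is_semi_connected := by
  intro graph _ _
  unfold Spec_is_semi_connected
  simp only [is_semi_connected, is_semi_connected_alt]
  rw [pvP1_rev, pvP2_eq, pvTail_eq]
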